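-- pv_equiv track=rewrite | github.com/mmbori/APCC | Lighttpd1.4/lighttpd1.4_transformed/tests/2_1_parsing_fp_as_a_parameter.py | strip_comments_strings_and_directives
-- ===== SOURCE A (Python) =====
-- def strip_comments_strings_and_directives(code: str) -> str:
--     """
--     주석, 문자열, 전처리 지시자 제거
--
--     개선사항:
--     - #define, #include 등 전처리 지시자 제거
--     - IOTRACE(A) 같은 매크로가 함수로 인식되는 것 방지
--     """
--     res, i, n = [], 0, len(code)
--
--     while i < n:
--         c = code[i]
--
--         # 전처리 지시자 제거 (#define, #include, #ifdef 등)
--         if c == '#':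
--             j = i + 1
--             # 백슬래시 연속 처리 (멀티라인 매크로)
--             while j < n:
--                 if code[j] == '\\' and j + 1 < n and code[j + 1] == '\n':
--                     j += 2  # 다음 줄로 연속
--                     continue
--                 if code[j] == '\n':
--                     j += 1
--                     break
--                 j += 1
--             res.append(' ')  # 공백으로 치환
--             i = j
--             continue
--
--         # 한 줄 주석 //
--         if c == '/' and i + 1 < n and code[i + 1] == '/':
--             j = i + 2
--             while j < n and code[j] != '\n':
--                 j += 1
--             res.append(' ')
--             i = j
--
--         # 블록 주석 /* */
--         elif c == '/' and i + 1 < n and code[i + 1] == '*':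
--             j = i + 2
--             while j + 1 < n and not (code[j] == '*' and code[j + 1] == '/'):
--                 j += 1
--             i = min(j + 2, n)
--             res.append(' ')
--
--         # 문자열 "..."
--         elif c == '"':
--             res.append(' ')
--             i += 1
--             esc = False
--             while i < n:
--                 if not esc and code[i] == '"':
--                     i += 1
--                     break
--                 esc = (not esc and code[i] == '\\')
--                 i += 1
--
--         # 문자 리터럴 '...'
--         elif c == "'":
--             res.append(' ')
--             i += 1
--             esc = False
--             while i < n:
--                 if not esc and code[i] == "'":
--                     i += 1
--                     break
--                 esc = (not esc and code[i] == '\\')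
--                 i += 1
--         else:
--             res.append(c)
--             i += 1
--
--     return ''.join(res)
-- ===== SOURCE B (Python) =====
-- def strip_comments_strings_and_directives(code: str) -> str:
--     # Single-pass finite state machine: one loop, a state variable, one flag.
--     NORMAL, LINE, BLOCK, STRING, DIRECTIVE = 0, 1, 2, 3, 4
--     out = []
--     state = NORMAL
--     flag = False      # esc in STRING, "prev char was '*'" in BLOCK, "prev char was '\\'" in DIRECTIVE
--     quote = '"'
--     i, n = 0, len(code)
--     while i < n:
--         c = code[i]
--         if state == NORMAL:
--             if c == '#':
--                 out.append(' '); state = DIRECTIVE; flag = False; i += 1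
--             elif c == '/' and i + 1 < n and code[i + 1] == '/':
--                 out.append(' '); state = LINE; i += 2
--             elif c == '/' and i + 1 < n and code[i + 1] == '*':
--                 out.append(' '); state = BLOCK; flag = False; i += 2
--             elif c == '"' or c == "'":
--                 out.append(' '); state = STRING; quote = c; flag = False; i += 1
--             else:
--                 out.append(c); i += 1
--         elif state == LINE:
--             if c == '\n':
--                 out.append('\n'); state = NORMAL
--             i += 1
--         elif state == BLOCK:
--             if flag and c == '/':
--                 state = NORMAL
--             else:
--                 flag = (c == '*')
--             i += 1
--         elif state == STRING:
--             if (not flag) and c == quote: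
--                 state = NORMAL
--             else:
--                 flag = (not flag) and c == '\\'
--             i += 1
--         else:  # DIRECTIVE
--             if c == '\n' and not flag:
--                 state = NORMAL
--             else:
--                 flag = (c == '\\')
--             i += 1
--     return ''.join(out)
-- ===== Notes on version B (the rewrite author's own statement) =====
-- stated objective: alternative
-- what changed: Replaced A's outer loop with five nested index-skipping while-loops by a single-pass finite state machine: one loop advancing i by one (two at a token start), holding a state in {NORMAL, LINE, BLOCK, STRING, DIRECTIVE} and one flag (escape / previous-star / previous-backslash).
import Mathlib
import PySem

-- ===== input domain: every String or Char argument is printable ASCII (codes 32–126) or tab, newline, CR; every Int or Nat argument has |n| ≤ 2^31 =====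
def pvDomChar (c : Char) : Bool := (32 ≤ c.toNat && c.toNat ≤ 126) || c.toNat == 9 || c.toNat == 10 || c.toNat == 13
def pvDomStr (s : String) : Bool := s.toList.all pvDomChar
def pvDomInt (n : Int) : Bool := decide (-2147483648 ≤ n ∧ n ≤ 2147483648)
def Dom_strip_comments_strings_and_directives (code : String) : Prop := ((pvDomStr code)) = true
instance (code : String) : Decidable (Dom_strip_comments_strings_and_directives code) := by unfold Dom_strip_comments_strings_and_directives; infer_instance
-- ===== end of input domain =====

-- B replaces A's nested skip-loops by a single-pass finite state machine (same output, same cost; objective: alternative decomposition).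

-- ===== PORT A =====
-- inner while of the '#' branch: skip a preprocessor directive (backslash-newline continues, newline ends and is consumed)
def pvADirSkip (cs : List Char) (j : Nat) : Nat :=
  if h : j < cs.length then
    if cs.getD j ' ' = '\\' ∧ j + 1 < cs.length ∧ cs.getD (j+1) ' ' = '\n' then
      pvADirSkip cs (j+2)
    else if cs.getD j ' ' = '\n' then j + 1
    else pvADirSkip cs (j+1)
  else j
termination_by cs.length - j
decreasing_by all_goals omega

-- inner while of the '//' branch
def pvALineSkip (cs : List Char) (j : Nat) : Nat :=
  if h : j < cs.length ∧ cs.getD j ' ' ≠ '\n' then pvALineSkip cs (j+1) else j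
termination_by cs.length - j
decreasing_by omega

-- inner while of the '/*' branch
def pvABlockSkip (cs : List Char) (j : Nat) : Nat :=
  if h : j + 1 < cs.length ∧ ¬(cs.getD j ' ' = '*' ∧ cs.getD (j+1) ' ' = '/') then pvABlockSkip cs (j+1) else j
termination_by cs.length - j
decreasing_by omega

-- inner while of the string / char-literal branches (q is the quote)
def pvAStrSkip (cs : List Char) (q : Char) (i : Nat) (esc : Bool) : Nat :=
  if h : i < cs.length then
    if ¬(esc = true) ∧ cs.getD i ' ' = q then i + 1
    else pvAStrSkip cs q (i+1) (!esc && (cs.getD i ' ' == '\\'))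
  else i
termination_by cs.length - i
decreasing_by omega

theorem pvADirSkip_ge (cs : List Char) (j : Nat) : j ≤ pvADirSkip cs j := by
  unfold pvADirSkip
  split
  · split
    · have := pvADirSkip_ge cs (j+2); omega
    · split
      · omega
      · have := pvADirSkip_ge cs (j+1); omega
  · omega
termination_by cs.length - j
decreasing_by all_goals omega

theorem pvALineSkip_ge (cs : List Char) (j : Nat) : j ≤ pvALineSkip cs j := by
  unfold pvALineSkip
  split
  · have := pvALineSkip_ge cs (j+1); omega
  · omega
termination_by cs.length - j
decreasing_by omega

theorem pvABlockSkip_ge (cs : List Char) (j : Nat) : j ≤ pvABlockSkip cs j := by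
  unfold pvABlockSkip
  split
  · have := pvABlockSkip_ge cs (j+1); omega
  · omega
termination_by cs.length - j
decreasing_by omega

theorem pvAStrSkip_ge (cs : List Char) (q : Char) (i : Nat) (esc : Bool) : i ≤ pvAStrSkip cs q i esc := by
  unfold pvAStrSkip
  split
  · split
    · omega
    · have := pvAStrSkip_ge cs q (i+1) (!esc && (cs.getD i ' ' == '\\')); omega
  · omega
termination_by cs.length - i
decreasing_by omega

-- A's outer while loop
def pvAMain (cs : List Char) (i : Nat) (res : List Char) : List Char :=
  if _h : i < cs.length then
    if cs.getD i ' ' = '#' then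
      pvAMain cs (pvADirSkip cs (i+1)) (res ++ [' '])
    else if cs.getD i ' ' = '/' ∧ i + 1 < cs.length ∧ cs.getD (i+1) ' ' = '/' then
      pvAMain cs (pvALineSkip cs (i+2)) (res ++ [' '])
    else if cs.getD i ' ' = '/' ∧ i + 1 < cs.length ∧ cs.getD (i+1) ' ' = '*' then
      pvAMain cs (min (pvABlockSkip cs (i+2) + 2) cs.length) (res ++ [' '])
    else if cs.getD i ' ' = '"' then
      pvAMain cs (pvAStrSkip cs '"' (i+1) false) (res ++ [' '])
    else if cs.getD i ' ' = '\'' then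
      pvAMain cs (pvAStrSkip cs '\'' (i+1) false) (res ++ [' '])
    else
      pvAMain cs (i+1) (res ++ [cs.getD i ' '])
  else res
termination_by cs.length - i
decreasing_by
  · have := pvADirSkip_ge cs (i+1); omega
  · have := pvALineSkip_ge cs (i+2); omega
  · have := pvABlockSkip_ge cs (i+2); omega
  · have := pvAStrSkip_ge cs '"' (i+1) false; omega
  · have := pvAStrSkip_ge cs '\'' (i+1) false; omega
  · omega

def strip_comments_strings_and_directives (code : String) : String :=
  String.mk (pvAMain code.toList 0 [])

-- ===== PORT B =====
inductive PvSt where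
  | normal | line | block | dir
  | str : Char → PvSt
deriving DecidableEq

-- B's single loop: one state, one flag (esc in str, prev-'*' in block, prev-'\' in dir)
def pvBLoop (cs : List Char) (i : Nat) (st : PvSt) (flag : Bool) (out : List Char) : List Char :=
  if _h : i < cs.length then
    match st with
    | .normal =>
      if cs.getD i ' ' = '#' then pvBLoop cs (i+1) .dir false (out ++ [' '])
      else if cs.getD i ' ' = '/' ∧ i + 1 < cs.length ∧ cs.getD (i+1) ' ' = '/' then
        pvBLoop cs (i+2) .line false (out ++ [' '])
      else if cs.getD i ' ' = '/' ∧ i + 1 < cs.length ∧ cs.getD (i+1) ' ' = '*' then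
        pvBLoop cs (i+2) .block false (out ++ [' '])
      else if cs.getD i ' ' = '"' ∨ cs.getD i ' ' = '\'' then
        pvBLoop cs (i+1) (.str (cs.getD i ' ')) false (out ++ [' '])
      else pvBLoop cs (i+1) .normal false (out ++ [cs.getD i ' '])
    | .line =>
      if cs.getD i ' ' = '\n' then pvBLoop cs (i+1) .normal false (out ++ ['\n'])
      else pvBLoop cs (i+1) .line false out
    | .block =>
      if flag = true ∧ cs.getD i ' ' = '/' then pvBLoop cs (i+1) .normal false out
      else pvBLoop cs (i+1) .block (cs.getD i ' ' == '*') out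
    | .str q =>
      if ¬(flag = true) ∧ cs.getD i ' ' = q then pvBLoop cs (i+1) .normal false out
      else pvBLoop cs (i+1) (.str q) (!flag && (cs.getD i ' ' == '\\')) out
    | .dir =>
      if cs.getD i ' ' = '\n' ∧ ¬(flag = true) then pvBLoop cs (i+1) .normal false out
      else pvBLoop cs (i+1) .dir (cs.getD i ' ' == '\\') out
  else out
termination_by cs.length - i
decreasing_by all_goals omega

def strip_comments_strings_and_directives_alt (code : String) : String :=
  String.mk (pvBLoop code.toList 0 .normal false [])

-- ===== PRECONDITION & SPEC =====
def Spec_strip_comments_strings_and_directives (code : String) (out : String) : Prop := out = strip_comments_strings_and_directives_alt code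
instance (code : String) (out : String) : Decidable (Spec_strip_comments_strings_and_directives code out) := by unfold Spec_strip_comments_strings_and_directives; infer_instance

-- ===== CLAIM (what is proved, stated in full; the proofs are below) =====
def Claim_equal_strip_comments_strings_and_directives : Prop := ∀ (code : String), Dom_strip_comments_strings_and_directives code → Spec_strip_comments_strings_and_directives code (strip_comments_strings_and_directives code)

-- ===== LEMMAS AND PROOFS =====

-- The combined invariant: each FSM state of B, run from position j, equals A's
-- corresponding skip-loop result fed back into A's main loop.
theorem pv_comb (cs : List Char) (j : Nat) :
    (∀ acc, pvBLoop cs j .normal false acc = pvAMain cs j acc) ∧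
    (∀ f acc, pvBLoop cs j .line f acc = pvAMain cs (pvALineSkip cs j) acc) ∧
    (∀ q f acc, pvBLoop cs j (.str q) f acc = pvAMain cs (pvAStrSkip cs q j f) acc) ∧
    (∀ f acc, (f = true → ¬(j < cs.length ∧ cs.getD j ' ' = '\n')) →
      pvBLoop cs j .dir f acc = pvAMain cs (pvADirSkip cs j) acc) ∧
    (∀ acc, pvBLoop cs j .block false acc = pvAMain cs (min (pvABlockSkip cs j + 2) cs.length) acc) ∧
    (∀ acc, 1 ≤ j → cs.getD (j-1) ' ' = '*' →
      pvBLoop cs j .block true acc = pvAMain cs (min (pvABlockSkip cs (j-1) + 2) cs.length) acc) := by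
  by_cases h : j < cs.length
  · have IH1 := pv_comb cs (j+1)
    have IH2 := pv_comb cs (j+2)
    obtain ⟨N1, L1, S1, D1, BF1, BT1⟩ := IH1
    obtain ⟨N2, L2, S2, D2, BF2, BT2⟩ := IH2
    refine ⟨?_, ?_, ?_, ?_, ?_, ?_⟩
    · -- NORMAL
      intro acc
      rw [pvBLoop, pvAMain, dif_pos h, dif_pos h]
      by_cases h1 : cs.getD j ' ' = '#'
      · rw [if_pos h1, if_pos h1]
        exact D1 false (acc ++ [' ']) (by simp)
      · rw [if_neg h1, if_neg h1]
        by_cases h2 : cs.getD j ' ' = '/' ∧ j + 1 < cs.length ∧ cs.getD (j+1) ' ' = '/'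
        · rw [if_pos h2, if_pos h2]
          exact L2 false (acc ++ [' '])
        · rw [if_neg h2, if_neg h2]
          by_cases h3 : cs.getD j ' ' = '/' ∧ j + 1 < cs.length ∧ cs.getD (j+1) ' ' = '*'
          · rw [if_pos h3, if_pos h3]
            exact BF2 (acc ++ [' '])
          · rw [if_neg h3, if_neg h3]
            by_cases h4 : cs.getD j ' ' = '"'
            · rw [if_pos (Or.inl h4), if_pos h4, h4]
              exact S1 '"' false (acc ++ [' '])
            · rw [if_neg h4]
              by_cases h5 : cs.getD j ' ' = '\''
              · rw [if_pos (Or.inr h5), if_pos h5, h5]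
                exact S1 '\'' false (acc ++ [' '])
              · rw [if_neg (by tauto), if_neg h5]
                exact N1 (acc ++ [cs.getD j ' '])
    · -- LINE
      intro f acc
      rw [pvBLoop, dif_pos h]
      by_cases hn : cs.getD j ' ' = '\n'
      · rw [if_pos hn]
        rw [show pvALineSkip cs j = j from by rw [pvALineSkip, dif_neg (fun hp => hp.2 hn)]]
        rw [pvAMain, dif_pos h, if_neg (by simp only [hn]; decide),
            if_neg (by simp only [hn]; exact fun hp => absurd hp.1 (by decide)),
            if_neg (by simp only [hn]; exact fun hp => absurd hp.1 (by decide)),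
            if_neg (by simp only [hn]; decide), if_neg (by simp only [hn]; decide), hn]
        exact N1 (acc ++ ['\n'])
      · rw [if_neg hn]
        rw [show pvALineSkip cs j = pvALineSkip cs (j+1) from by
          rw [pvALineSkip, dif_pos ⟨h, hn⟩]]
        exact L1 false acc
    · -- STRING
      intro q f acc
      rw [pvBLoop, dif_pos h]
      by_cases hq : ¬(f = true) ∧ cs.getD j ' ' = q
      · rw [if_pos hq]
        rw [show pvAStrSkip cs q j f = j + 1 from by rw [pvAStrSkip, dif_pos h, if_pos hq]]
        exact N1 acc
      · rw [if_neg hq]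
        rw [show pvAStrSkip cs q j f = pvAStrSkip cs q (j+1) (!f && (cs.getD j ' ' == '\\')) from by
          rw [pvAStrSkip, dif_pos h, if_neg hq]]
        exact S1 q (!f && (cs.getD j ' ' == '\\')) acc
    · -- DIRECTIVE
      intro f acc hf
      rw [pvBLoop, dif_pos h]
      by_cases hn : cs.getD j ' ' = '\n'
      · have hf0 : f = false := by
          cases f
          · rfl
          · exact absurd ⟨h, hn⟩ (hf rfl)
        subst hf0
        rw [if_pos ⟨hn, by simp⟩]
        rw [show pvADirSkip cs j = j + 1 from by
          rw [pvADirSkip, dif_pos h, if_neg (by simp only [hn]; exact fun hp => absurd hp.1 (by decide)), if_pos hn]]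
        exact N1 acc
      · rw [if_neg (by tauto)]
        by_cases hbs : cs.getD j ' ' = '\\' ∧ j + 1 < cs.length ∧ cs.getD (j+1) ' ' = '\n'
        · rw [show pvADirSkip cs j = pvADirSkip cs (j+2) from by
            rw [pvADirSkip, dif_pos h, if_pos hbs]]
          rw [pvBLoop, dif_pos hbs.2.1]
          rw [if_neg (fun hp => hp.2 (beq_iff_eq.mpr hbs.1)), hbs.2.2,
              show (('\n' : Char) == '\\') = false from by decide]
          exact D2 false acc (by simp)
        · rw [show pvADirSkip cs j = pvADirSkip cs (j+1) from by
            rw [pvADirSkip, dif_pos h, if_neg hbs, if_neg hn]]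
          apply D1
          intro hff hcontra
          exact hbs ⟨by simpa using hff, hcontra⟩
    · -- BLOCK entered (flag = false)
      intro acc
      rw [pvBLoop, dif_pos h]
      rw [if_neg (by simp)]
      by_cases hs : cs.getD j ' ' = '*'
      · rw [show ((cs.getD j ' ') == '*') = true from beq_iff_eq.mpr hs]
        have := BT1 acc (by omega) (by simpa using hs)
        simpa using this
      · rw [show ((cs.getD j ' ') == '*') = false from beq_eq_false_iff_ne.mpr hs]
        by_cases h2 : j + 1 < cs.length
        · rw [show pvABlockSkip cs j = pvABlockSkip cs (j+1) from by
            rw [pvABlockSkip, dif_pos ⟨h2, fun hp => hs hp.1⟩]]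
          exact BF1 acc
        · rw [show pvABlockSkip cs j = j from by rw [pvABlockSkip, dif_neg (by tauto)]]
          rw [show min (j+2) cs.length = cs.length from by omega]
          rw [pvBLoop, dif_neg (by omega), pvAMain, dif_neg (by omega)]
    · -- BLOCK continuing (flag = true, previous char was '*')
      intro acc hj hprev
      have hj1 : j - 1 + 1 = j := by omega
      rw [pvBLoop, dif_pos h]
      by_cases hc : cs.getD j ' ' = '/'
      · rw [if_pos ⟨rfl, hc⟩]
        rw [show pvABlockSkip cs (j-1) = j - 1 from by
          rw [pvABlockSkip, dif_neg (fun hp => hp.2 ⟨hprev, by rw [hj1]; exact hc⟩)]]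
        rw [show min (j - 1 + 2) cs.length = j + 1 from by omega]
        exact N1 acc
      · rw [if_neg (fun hp => hc hp.2)]
        rw [show pvABlockSkip cs (j-1) = pvABlockSkip cs j from by
          rw [pvABlockSkip, dif_pos ⟨by omega, fun hp => hc (by rw [hj1] at hp; exact hp.2)⟩, hj1]]
        by_cases hs : cs.getD j ' ' = '*'
        · rw [show ((cs.getD j ' ') == '*') = true from beq_iff_eq.mpr hs]
          have := BT1 acc (by omega) (by simpa using hs)
          simpa using this
        · rw [show ((cs.getD j ' ') == '*') = false from beq_eq_false_iff_ne.mpr hs]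
          by_cases h2 : j + 1 < cs.length
          · rw [show pvABlockSkip cs j = pvABlockSkip cs (j+1) from by
              rw [pvABlockSkip, dif_pos ⟨h2, fun hp => hs hp.1⟩]]
            exact BF1 acc
          · rw [show pvABlockSkip cs j = j from by rw [pvABlockSkip, dif_neg (by tauto)]]
            rw [show min (j+2) cs.length = cs.length from by omega]
            rw [pvBLoop, dif_neg (by omega), pvAMain, dif_neg (by omega)]
  · -- base case: j ≥ cs.length
    refine ⟨?_, ?_, ?_, ?_, ?_, ?_⟩
    · intro acc
      rw [pvBLoop, dif_neg h, pvAMain, dif_neg h]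
    · intro f acc
      rw [pvBLoop, dif_neg h,
          show pvALineSkip cs j = j from by rw [pvALineSkip, dif_neg (fun hp => h hp.1)],
          pvAMain, dif_neg h]
    · intro q f acc
      rw [pvBLoop, dif_neg h,
          show pvAStrSkip cs q j f = j from by rw [pvAStrSkip, dif_neg h],
          pvAMain, dif_neg h]
    · intro f acc _
      rw [pvBLoop, dif_neg h,
          show pvADirSkip cs j = j from by rw [pvADirSkip, dif_neg h],
          pvAMain, dif_neg h]
    · intro acc
      rw [pvBLoop, dif_neg h,
          show pvABlockSkip cs j = j from by
            rw [pvABlockSkip, dif_neg (fun hp => absurd hp.1 (by omega))],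
          show min (j+2) cs.length = cs.length from by omega,
          pvAMain, dif_neg (by omega)]
    · intro acc hj hprev
      rw [pvBLoop, dif_neg h,
          show pvABlockSkip cs (j-1) = j - 1 from by
            rw [pvABlockSkip, dif_neg (fun hp => absurd hp.1 (by omega))],
          show min (j - 1 + 2) cs.length = cs.length from by omega,
          pvAMain, dif_neg (by omega)]
termination_by cs.length - j
decreasing_by all_goals omega

-- ===== VERDICT (by name: the statement is the Claim_ definition above) =====
theorem strip_comments_strings_and_directives_spec : Claim_equal_strip_comments_strings_and_directives := by
  intro code _
  unfold Spec_strip_comments_strings_and_directives strip_comments_strings_and_directives strip_comments_strings_and_directives_alt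
  exact congrArg String.mk ((pv_comb code.toList 0).1 []).symm
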